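-- pv_equiv track=rewrite | github.com/karanb03/llcc | ass8.py | generate_mnt_mdt
-- ===== SOURCE A (Python) =====
-- def generate_mnt_mdt(code):
--     mnt = {}  # Macro Name Table (MNT)
--     mdt = {}  # Macro Definition Table (MDT)
--     mdt_index = 1
--
--     i = 0
--     while i < len(code):
--         line = code[i].strip()
--         tokens = line.split()
--
--         if tokens and tokens[0] == "MACRO":
--             macro_name = tokens[1]
--             parameters = tokens[2:] if len(tokens) > 2 else []
--
--             # Collect macro definition
--             macro_definition = []
--             i += 1
--             while i < len(code) and code[i].strip() != "MEND":
--                 macro_definition.append(code[i].strip())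
--                 i += 1
--
--             # Record macro details in MNT
--             mnt[macro_name] = (mdt_index, parameters)
--
--             # Record macro definition in MDT
--             mdt[mdt_index] = macro_definition
--             mdt_index += 1
--
--         i += 1
--
--     return mnt, mdt
-- ===== SOURCE B (Python) =====
-- def generate_mnt_mdt(code):
--     mnt = {}
--     mdt = {}
--     mdt_index = 1
--     in_macro = False
--     current_name = None
--     current_params = []
--     current_def = []
--     for raw in code:
--         line = raw.strip()
--         tokens = line.split()
--         if not in_macro and tokens and tokens[0] == "MACRO":
--             in_macro = True
--             current_name = tokens[1]
--             current_params = tokens[2:]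
--             current_def = []
--         elif in_macro and line == "MEND":
--             mnt[current_name] = (mdt_index, current_params)
--             mdt[mdt_index] = current_def
--             mdt_index += 1
--             in_macro = False
--         elif in_macro:
--             current_def.append(line)
--     if in_macro:
--         mnt[current_name] = (mdt_index, current_params)
--         mdt[mdt_index] = current_def
--     return mnt, mdt
-- ===== Notes on version B (the rewrite author's own statement) =====
-- stated objective: idiomatic
-- what changed: Replaced A's index-driven while-loop with a nested inner while that consumes the macro body by a single flat for-loop state machine (in_macro flag plus current name/params/body accumulators, with an EOF flush), removing all index arithmetic.
import Mathlib
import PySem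

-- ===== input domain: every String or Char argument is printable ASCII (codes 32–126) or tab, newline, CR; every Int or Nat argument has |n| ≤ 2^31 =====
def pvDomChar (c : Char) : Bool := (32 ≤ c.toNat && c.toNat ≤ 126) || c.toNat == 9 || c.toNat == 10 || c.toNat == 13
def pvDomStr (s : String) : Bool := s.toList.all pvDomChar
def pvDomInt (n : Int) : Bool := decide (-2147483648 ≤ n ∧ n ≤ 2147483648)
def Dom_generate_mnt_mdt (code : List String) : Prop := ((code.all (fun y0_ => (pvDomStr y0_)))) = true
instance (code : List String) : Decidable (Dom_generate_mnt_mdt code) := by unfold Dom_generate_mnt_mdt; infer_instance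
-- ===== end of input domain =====

-- B replaces A's index-driven while-loop (with a nested body-consuming inner while) by a single
-- flat for-loop state machine (in_macro flag + accumulators, EOF flush); same cost, more idiomatic.


-- ===== PORT A =====
-- inner 'while i < len(code) and code[i].strip() != "MEND": macro_definition.append(code[i].strip()); i += 1'
-- (returns the collected body and the lines remaining after the consumed MEND / end of input,
--  accounting for the outer 'i += 1' that skips the MEND line itself)
def pvCollectA : List String → List String × List String
  | [] => ([], [])
  | l :: t =>
    if PySem.Str.strip l = "MEND" then ([], t)
    else
      let r := pvCollectA t
      (PySem.Str.strip l :: r.1, r.2)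

theorem pvCollectA_snd_length : ∀ (xs : List String), (pvCollectA xs).2.length ≤ xs.length := by
  intro xs
  induction xs with
  | nil => simp [pvCollectA]
  | cons l t ih =>
    simp only [pvCollectA]
    split
    · simp
    · simpa using Nat.le_succ_of_le ih

-- outer 'while i < len(code)' loop of A, one step per top-level line
set_option maxHeartbeats 1000000 in
def pvGoA : List String → PySem.Dict String (Int × List String) → PySem.Dict Int (List String) → Int →
    (List (String × Int × List String)) × (List (Int × List String))
  | [], mnt, mdt, _ => (mnt.items, mdt.items)
  | l :: rest, mnt, mdt, idx =>
    let line := PySem.Str.strip l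
    let tokens := PySem.Str.split₀ line
    match tokens with
    | t0 :: trest =>
      if t0 = "MACRO" then
        -- tokens[1]: IndexError when trest = [] (excluded by Pre_); ported totally via headD
        let macroName := trest.headD ""
        let parameters := (t0 :: trest).drop 2
        let c := pvCollectA rest
        pvGoA c.2 (mnt.insert macroName (idx, parameters)) (mdt.insert idx c.1) (idx + 1)
      else pvGoA rest mnt mdt idx
    | [] => pvGoA rest mnt mdt idx
  termination_by code _ _ _ => code.length
  decreasing_by
    · exact Nat.lt_succ_of_le (pvCollectA_snd_length rest)
    · simp

def generate_mnt_mdt (code : List String) : (List (String × Int × List String)) × (List (Int × List String)) :=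
  pvGoA code PySem.Dict.empty PySem.Dict.empty 1

-- ===== PORT B =====
-- single flat for-loop state machine of Source B: in_macro flag, current name/params/body, EOF flush
def pvGoB : List String → Bool → String → List String → List String →
    PySem.Dict String (Int × List String) → PySem.Dict Int (List String) → Int →
    (List (String × Int × List String)) × (List (Int × List String))
  | [], inm, name, params, defn, mnt, mdt, idx =>
    if inm then ((mnt.insert name (idx, params)).items, (mdt.insert idx defn).items)
    else (mnt.items, mdt.items)
  | raw :: rest, inm, name, params, defn, mnt, mdt, idx =>
    let line := PySem.Str.strip raw
    let tokens := PySem.Str.split₀ line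
    if ¬inm ∧ tokens.head? = some "MACRO" then
      -- tokens[1]: IndexError when absent (excluded by Pre_); ported totally via getD
      pvGoB rest true (tokens.getD 1 "") (tokens.drop 2) [] mnt mdt idx
    else if inm ∧ line = "MEND" then
      pvGoB rest false "" [] [] (mnt.insert name (idx, params)) (mdt.insert idx defn) (idx + 1)
    else if inm then
      pvGoB rest true name params (defn ++ [line]) mnt mdt idx
    else
      pvGoB rest false name params defn mnt mdt idx

def generate_mnt_mdt_alt (code : List String) : (List (String × Int × List String)) × (List (Int × List String)) :=
  pvGoB code false "" [] [] PySem.Dict.empty PySem.Dict.empty 1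

-- ===== PRECONDITION & SPEC =====
-- Pre_ excludes exactly the inputs on which the Python A raises IndexError at tokens[1]: a line
-- OUTSIDE any macro body that tokenises to exactly ["MACRO"] with no name after it (B raises the
-- same IndexError there); bare "MACRO" lines inside a macro body are body text and stay admitted.
def pvNoBareTopMacro : List String → Bool → Bool
  | [], _ => true
  | l :: t, false =>
    match PySem.Str.split₀ (PySem.Str.strip l) with
    | ["MACRO"] => false
    | "MACRO" :: _ => pvNoBareTopMacro t true
    | _ => pvNoBareTopMacro t false
  | l :: t, true => pvNoBareTopMacro t (decide (PySem.Str.strip l ≠ "MEND"))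

def Pre_generate_mnt_mdt (code : List String) : Prop :=
  pvNoBareTopMacro code false = true
instance (code : List String) : Decidable (Pre_generate_mnt_mdt code) := by
  unfold Pre_generate_mnt_mdt; infer_instance

def pvWitness_generate_mnt_mdt : List String :=
  ["MACRO INCR &ARG", "ADD &ARG ONE", "MEND", "START", "INCR X", "END"]

def Spec_generate_mnt_mdt (code : List String) (out : (List (String × Int × List String)) × (List (Int × List String))) : Prop := out = generate_mnt_mdt_alt code
instance (code : List String) (out : (List (String × Int × List String)) × (List (Int × List String))) : Decidable (Spec_generate_mnt_mdt code out) := by unfold Spec_generate_mnt_mdt; infer_instance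

-- ===== CLAIM (what is proved, stated in full; the proofs are below) =====
def Claim_equal_generate_mnt_mdt : Prop := ∀ (code : List String), Dom_generate_mnt_mdt code → Pre_generate_mnt_mdt code → Spec_generate_mnt_mdt code (generate_mnt_mdt code)

-- ===== LEMMAS AND PROOFS =====

-- unfolding equations for A's well-founded outer loop
theorem pvGoA_nil (mnt : PySem.Dict String (Int × List String)) (mdt : PySem.Dict Int (List String)) (idx : Int) :
    pvGoA [] mnt mdt idx = (mnt.items, mdt.items) := by
  rw [pvGoA]

theorem pvGoA_cons_macro (l : String) (rest trest : List String)
    (mnt : PySem.Dict String (Int × List String)) (mdt : PySem.Dict Int (List String)) (idx : Int)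
    (htok : PySem.Str.split₀ (PySem.Str.strip l) = "MACRO" :: trest) :
    pvGoA (l :: rest) mnt mdt idx =
      pvGoA (pvCollectA rest).2 (mnt.insert (trest.headD "") (idx, ("MACRO" :: trest).drop 2))
        (mdt.insert idx (pvCollectA rest).1) (idx + 1) := by
  rw [pvGoA, htok]
  simp

theorem pvGoA_cons_skip (l : String) (rest : List String)
    (mnt : PySem.Dict String (Int × List String)) (mdt : PySem.Dict Int (List String)) (idx : Int)
    (h : (PySem.Str.split₀ (PySem.Str.strip l)).head? ≠ some "MACRO") :
    pvGoA (l :: rest) mnt mdt idx = pvGoA rest mnt mdt idx := by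
  rw [pvGoA]
  cases htok : PySem.Str.split₀ (PySem.Str.strip l) with
  | nil => simp
  | cons t0 trest =>
    rw [htok] at h
    simp only [List.head?_cons, ne_eq, Option.some.injEq] at h
    simp [h]

-- The heart of the proof: B's two loop states correspond to A's outer loop (in_macro = false)
-- and to A's inner body-collecting loop followed by the commit (in_macro = true).
theorem pvGoB_eq_pvGoA : ∀ (rest : List String),
    (∀ mnt mdt idx a b c, pvGoB rest false a b c mnt mdt idx = pvGoA rest mnt mdt idx) ∧
    (∀ mnt mdt idx name params defn,
      pvGoB rest true name params defn mnt mdt idx =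
        pvGoA (pvCollectA rest).2 (mnt.insert name (idx, params))
          (mdt.insert idx (defn ++ (pvCollectA rest).1)) (idx + 1)) := by
  intro rest
  induction rest with
  | nil =>
    constructor
    · intro mnt mdt idx a b c; simp [pvGoB, pvGoA_nil]
    · intro mnt mdt idx name params defn; simp [pvGoB, pvGoA_nil, pvCollectA]
  | cons l t ih =>
    obtain ⟨ihF, ihT⟩ := ih
    constructor
    · intro mnt mdt idx a b c
      by_cases hM : (PySem.Str.split₀ (PySem.Str.strip l)).head? = some "MACRO"
      · -- top-level MACRO line: A enters the inner loop, B switches to in_macro state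
        obtain ⟨trest, htok⟩ : ∃ trest, PySem.Str.split₀ (PySem.Str.strip l) = "MACRO" :: trest := by
          cases h : PySem.Str.split₀ (PySem.Str.strip l) with
          | nil => rw [h] at hM; simp at hM
          | cons x xs =>
            rw [h] at hM; simp only [List.head?_cons, Option.some.injEq] at hM
            exact ⟨xs, by rw [hM]⟩
        rw [pvGoA_cons_macro l t trest mnt mdt idx htok]
        simp only [pvGoB, htok]
        rw [if_pos (by simp)]
        rw [ihT]
        simp [List.getD, List.headD_eq_head?_getD, List.head?_eq_getElem?]
      · -- non-MACRO top-level line: both skip it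
        rw [pvGoA_cons_skip l t mnt mdt idx hM]
        simp only [pvGoB]
        rw [if_neg (by simp [hM]), if_neg (by simp), if_neg (by simp)]
        exact ihF mnt mdt idx a b c
    · intro mnt mdt idx name params defn
      by_cases hE : PySem.Str.strip l = "MEND"
      · -- MEND ends the body: A commits and resumes the outer loop; B commits and clears state
        simp [pvGoB, pvCollectA, hE, ihF]
      · -- body line (even one starting with MACRO): both append the stripped line
        simp [pvGoB, pvCollectA, hE, ihT, List.append_assoc]

theorem generate_mnt_mdt_eq (code : List String) : generate_mnt_mdt code = generate_mnt_mdt_alt code := by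
  unfold generate_mnt_mdt generate_mnt_mdt_alt
  exact ((pvGoB_eq_pvGoA code).1 _ _ _ _ _ _).symm

-- ===== VERDICT (by name: the statement is the Claim_ definition above) =====
theorem generate_mnt_mdt_spec : Claim_equal_generate_mnt_mdt := by
  intro code _ _
  unfold Spec_generate_mnt_mdt
  exact generate_mnt_mdt_eq code
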